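-- pv_equiv track=rewrite | github.com/runstr/AoC22 | y2024/Day5/day5_2.py | get_rules_and_orders
-- ===== SOURCE A (Python) =====
-- def get_rules_and_orders(data):
--     rules = []
--     orders = []
--     set_rules = True
--     for line in data:
--         if line == "":
--             set_rules= False
--             continue
--         if set_rules:
--             rules.append(line)
--         else:
--             orders.append(line)
--     return rules, orders
-- ===== SOURCE B (Python) =====
-- def get_rules_and_orders(data):
--     data = list(data)
--     try:
--         i = data.index("")
--     except ValueError:
--         i = len(data)
--     return data[:i], [line for line in data[i + 1:] if line != ""]
-- ===== Notes on version B (the rewrite author's own statement) =====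
-- stated objective: simpler
-- what changed: Replaces the stateful flag-toggling single pass with a find-the-first-blank-line index, a slice for the rules and a blank-filtering comprehension for the orders.
import Mathlib
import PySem

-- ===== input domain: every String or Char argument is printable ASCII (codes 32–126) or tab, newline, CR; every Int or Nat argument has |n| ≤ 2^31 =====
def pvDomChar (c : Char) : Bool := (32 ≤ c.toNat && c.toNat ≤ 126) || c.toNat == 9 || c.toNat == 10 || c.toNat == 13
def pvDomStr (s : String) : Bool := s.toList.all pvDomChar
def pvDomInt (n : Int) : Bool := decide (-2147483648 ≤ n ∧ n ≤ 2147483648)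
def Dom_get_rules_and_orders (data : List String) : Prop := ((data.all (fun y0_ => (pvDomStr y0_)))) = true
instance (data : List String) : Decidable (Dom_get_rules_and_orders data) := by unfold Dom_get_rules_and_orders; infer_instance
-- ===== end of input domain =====

-- B replaces A's flag-toggling accumulation pass by locating the first blank line and slicing/filtering around it (objective: simpler).


-- ===== PORT A =====
-- literal transliteration of A's loop: state (rules, orders, set_rules)
def pvGoA : List String → List String → List String → Bool → List String × List String
  | [], rules, orders, _ => (rules, orders)
  | line :: rest, rules, orders, set_rules =>
    if line = "" then pvGoA rest rules orders false
    else if set_rules then pvGoA rest (rules ++ [line]) orders set_rules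
    else pvGoA rest rules (orders ++ [line]) set_rules

def get_rules_and_orders (data : List String) : List String × List String :=
  pvGoA data [] [] true

-- ===== PORT B =====
-- transliteration of Source B: index of first "", slice before it, filter blanks after it
def get_rules_and_orders_alt (data : List String) : List String × List String :=
  match PySem.List.index? data "" with
  | none => (data, (data.drop (data.length + 1)).filter (fun line => line ≠ ""))
  | some i => (data.take i, (data.drop (i + 1)).filter (fun line => line ≠ ""))

-- ===== PRECONDITION & SPEC =====
def Spec_get_rules_and_orders (data : List String) (out : List String × List String) : Prop := out = get_rules_and_orders_alt data
instance (data : List String) (out : List String × List String) : Decidable (Spec_get_rules_and_orders data out) := by unfold Spec_get_rules_and_orders; infer_instance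

-- ===== CLAIM (what is proved, stated in full; the proofs are below) =====
def Claim_equal_get_rules_and_orders : Prop := ∀ (data : List String), Dom_get_rules_and_orders data → Spec_get_rules_and_orders data (get_rules_and_orders data)

-- ===== LEMMAS AND PROOFS =====

theorem pvGoA_false (data rules orders : List String) :
    pvGoA data rules orders false = (rules, orders ++ data.filter (fun line => line ≠ "")) := by
  induction data generalizing orders with
  | nil => simp [pvGoA]
  | cons l rest ih =>
    by_cases h : l = "" <;> simp [pvGoA, h, ih]

theorem pvGoA_true (data rules orders : List String) :
    pvGoA data rules orders true =
      match PySem.List.index? data "" with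
      | none => (rules ++ data, orders)
      | some i => (rules ++ data.take i, orders ++ (data.drop (i + 1)).filter (fun line => line ≠ "")) := by
  induction data generalizing rules with
  | nil => simp [pvGoA, PySem.List.index?]
  | cons l rest ih =>
    by_cases h : l = ""
    · simp [pvGoA, h, PySem.List.index?, List.idxOf?_cons, pvGoA_false]
    · have : PySem.List.index? (l :: rest) "" = (PySem.List.index? rest "").map (· + 1) := by
        simp only [PySem.List.index?, List.idxOf?_cons, beq_iff_eq, if_neg h]
      rw [pvGoA]
      simp only [if_neg h, this, ih]
      cases PySem.List.index? rest "" with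
      | none => simp
      | some i => simp [List.take_succ_cons]

-- ===== VERDICT (by name: the statement is the Claim_ definition above) =====
theorem get_rules_and_orders_spec : Claim_equal_get_rules_and_orders := by
  intro data _
  unfold Spec_get_rules_and_orders get_rules_and_orders get_rules_and_orders_alt
  rw [pvGoA_true]
  cases h : PySem.List.index? data "" with
  | none =>
    have hd : data.drop (data.length + 1) = [] := List.drop_eq_nil_of_le (by omega)
    simp [hd]
  | some i => simp
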